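-- pv_equiv track=rewrite | github.com/jhdonghj/MinerU-Diffusion | docs/gradio/speed_compare/parsers.py | placeholder_text_for
-- ===== SOURCE A (Python) =====
-- def placeholder_text_for(text: str) -> str:
--     output = []
--     for char in text:
--         if char == "\n":
--             output.append("\n")
--         elif char == "\t":
--             output.append("  ")
--         else:
--             output.append("·")
--     return "".join(output)
-- ===== SOURCE B (Python) =====
-- def placeholder_text_for(text: str) -> str:
--     # Run-based two-pointer scan: copy each maximal run of ordinary characters
--     # as a single repeated-glyph chunk, then emit the translation of the one
--     # special character ('\n' or '\t') that ended the run.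
--     parts = []
--     i = 0
--     n = len(text)
--     while i < n:
--         j = i
--         while j < n and text[j] != '\n' and text[j] != '\t':
--             j += 1
--         parts.append('·' * (j - i))
--         if j < n:
--             parts.append('\n' if text[j] == '\n' else '  ')
--             j += 1
--         i = j
--     return ''.join(parts)
-- ===== Notes on version B (the rewrite author's own statement) =====
-- stated objective: alternative
-- what changed: Replaced the per-character branch-and-append loop with a run-based two-pointer scan that emits each maximal run of ordinary characters as one repeated-glyph chunk and translates only the delimiting newline/tab.
import Mathlib
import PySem

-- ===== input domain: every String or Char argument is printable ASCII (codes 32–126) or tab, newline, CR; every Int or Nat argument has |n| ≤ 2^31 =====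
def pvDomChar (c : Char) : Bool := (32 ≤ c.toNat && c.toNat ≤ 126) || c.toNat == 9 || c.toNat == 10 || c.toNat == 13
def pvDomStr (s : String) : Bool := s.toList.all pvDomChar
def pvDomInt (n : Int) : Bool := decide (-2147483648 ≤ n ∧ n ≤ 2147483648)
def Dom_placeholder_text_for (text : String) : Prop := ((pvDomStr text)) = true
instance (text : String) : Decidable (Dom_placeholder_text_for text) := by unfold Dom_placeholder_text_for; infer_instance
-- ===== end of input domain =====

-- B replaces A's per-character branch-and-append loop by a run-based two-pointer scan
-- (each maximal run of ordinary characters becomes one repeated-glyph chunk); alternative, same cost.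


-- ===== PORT A =====
-- per-character loop: append "\n" / "  " / "·" for each char, then "".join(output)
def placeholder_text_for (text : String) : String :=
  let output : List String := text.toList.foldl (fun acc c =>
    if c == '\n' then acc ++ ["\n"]
    else if c == '\t' then acc ++ ["  "]
    else acc ++ ["·"]) []
  PySem.Str.join "" output

-- ===== PORT B =====
-- the outer while loop of Source B: each step consumes one maximal run of ordinary characters
-- (the inner `j += 1` scan = takeWhile) and emits '·'*(j-i), then the special char ending it
def pvAltGo : List Char → List (List Char)
  | [] => []
  | c :: cs =>
      let run := (c :: cs).takeWhile (fun ch => !(ch == '\n' || ch == '\t'))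
      let rest := (c :: cs).drop run.length
      List.replicate run.length '·' ::
        (match hrest : rest with
         | [] => []
         | _d :: rest' => (if _d == '\n' then ['\n'] else [' ', ' ']) :: pvAltGo rest')
  termination_by cs => cs.length
  decreasing_by
    simp_wf
    have : rest.length = (c :: cs).length - run.length := by simp [rest]
    rw [hrest] at this
    simp at this
    omega

-- ''.join(parts)
def placeholder_text_for_alt (text : String) : String :=
  String.ofList (PySem.Chars.join [] (pvAltGo text.toList))

-- ===== PRECONDITION & SPEC =====
def Spec_placeholder_text_for (text : String) (out : String) : Prop := out = placeholder_text_for_alt text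
instance (text : String) (out : String) : Decidable (Spec_placeholder_text_for text out) := by unfold Spec_placeholder_text_for; infer_instance

-- ===== CLAIM (what is proved, stated in full; the proofs are below) =====
def Claim_equal_placeholder_text_for : Prop := ∀ (text : String), Dom_placeholder_text_for text → Spec_placeholder_text_for text (placeholder_text_for text)

-- ===== LEMMAS AND PROOFS =====

-- the per-character translation both programs realise, on the char-list side
def pvH (c : Char) : List Char :=
  if c == '\n' then ['\n'] else if c == '\t' then [' ', ' '] else ['·']

lemma pvJoin_empty (ls : List (List Char)) : PySem.Chars.join [] ls = ls.flatten := by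
  induction ls with
  | nil => simp [PySem.Chars.join_nil]
  | cons p rest ih =>
    cases rest with
    | nil => simp [PySem.Chars.join_singleton]
    | cons q r => rw [PySem.Chars.join_cons_cons]; simp [ih]

lemma pvDrop_takeWhile (p : Char → Bool) (l : List Char) :
    l.drop (l.takeWhile p).length = l.dropWhile p := by
  induction l with
  | nil => simp
  | cons c cs ih => by_cases h : p c <;> simp [h, ih]

lemma pvRun_flatMap (run : List Char)
    (h : ∀ c ∈ run, (!(c == '\n' || c == '\t')) = true) :
    run.flatMap pvH = List.replicate run.length '·' := by
  induction run with
  | nil => simp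
  | cons c cs ih =>
    have hc := h c (by simp)
    simp only [Bool.not_eq_eq_eq_not, Bool.not_true, Bool.or_eq_false_iff, beq_eq_false_iff_ne,
      ne_eq] at hc
    simp [List.flatMap_cons, pvH, hc.1, hc.2, List.replicate_succ,
      ih (fun x hx => h x (by simp [hx]))]

lemma pvAltGo_flatten (cs : List Char) : (pvAltGo cs).flatten = cs.flatMap pvH := by
  induction cs using pvAltGo.induct with
  | case1 => simp [pvAltGo]
  | case2 c cs runh resth ih =>
    rw [pvAltGo]
    set p : Char → Bool := fun ch => !(ch == '\n' || ch == '\t') with hp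
    have hdrop : (c :: cs).drop ((c :: cs).takeWhile p).length = (c :: cs).dropWhile p :=
      pvDrop_takeWhile p (c :: cs)
    have hsplit : (c :: cs).takeWhile p ++ (c :: cs).dropWhile p = c :: cs :=
      List.takeWhile_append_dropWhile
    have hruns : ((c :: cs).takeWhile p).flatMap pvH
        = List.replicate ((c :: cs).takeWhile p).length '·' :=
      pvRun_flatMap _ (fun x hx => List.mem_takeWhile_imp (p := p) hx)
    split
    next heq =>
      have hrest : (c :: cs).dropWhile p = [] := by rw [← hdrop]; exact heq
      have hall : (c :: cs).takeWhile p = c :: cs := by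
        have := hsplit; rw [hrest] at this; simpa using this
      have hflatall : (c :: cs).flatMap pvH
          = List.replicate ((c :: cs).takeWhile p).length '·' := by
        conv_lhs => rw [← hall]
        exact hruns
      simp [hflatall]
    next d rest' heq =>
      have hrest : (c :: cs).dropWhile p = d :: rest' := by rw [← hdrop]; exact heq
      have hd : p d = false := by
        have h1 := List.head_dropWhile_not p (l := c :: cs) (by simp [hrest])
        simpa [hrest] using h1
      have hflat : (c :: cs).flatMap pvH
          = ((c :: cs).takeWhile p).flatMap pvH ++ pvH d ++ rest'.flatMap pvH := by
        conv_lhs => rw [← hsplit]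
        simp [hrest, List.flatMap_append]
      have hpvH : pvH d = (if d == '\n' then ['\n'] else [' ', ' ']) := by
        have hd' : d = '\n' ∨ d = '\t' := by
          by_contra hcon
          push_neg at hcon
          simp [hp, hcon.1, hcon.2] at hd
        rcases hd' with h | h <;> subst h <;> decide
      simp [ih d rest' heq, hflat, hruns, hpvH]

lemma pvFoldl_A (cs : List Char) (acc : List String) :
    cs.foldl (fun acc c =>
      if c == '\n' then acc ++ ["\n"]
      else if c == '\t' then acc ++ ["  "]
      else acc ++ ["·"]) acc
    = acc ++ cs.map (fun c =>
        if c == '\n' then ("\n" : String) else if c == '\t' then "  " else "·") := by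
  induction cs generalizing acc with
  | nil => simp
  | cons c cs ih =>
    simp only [List.foldl_cons, List.map_cons]
    rw [ih]
    by_cases h1 : c = '\n'
    · simp [h1]
    · by_cases h2 : c = '\t' <;> simp [h1, h2]

lemma pvA_chars (cs : List Char) :
    (PySem.Str.join "" (cs.map (fun c =>
      if c == '\n' then ("\n" : String) else if c == '\t' then "  " else "·"))).toList
      = cs.flatMap pvH := by
  rw [PySem.Str.toList_join]
  have : ("" : String).toList = ([] : List Char) := rfl
  rw [this, pvJoin_empty, List.map_map, List.flatten_eq_flatMap, List.flatMap_map]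
  apply List.flatMap_congr  -- may not exist; fallback below
  intro c _
  by_cases h1 : c = '\n'
  · subst h1; decide
  · by_cases h2 : c = '\t'
    · subst h2; decide
    · simp [pvH, h1, h2]

-- ===== VERDICT (by name: the statement is the Claim_ definition above) =====
theorem placeholder_text_for_spec : Claim_equal_placeholder_text_for := by
  intro text _
  unfold Spec_placeholder_text_for placeholder_text_for placeholder_text_for_alt
  apply String.toList_inj.mp
  rw [String.toList_ofList, pvJoin_empty, pvAltGo_flatten]
  simp only [pvFoldl_A text.toList [], List.nil_append]
  exact pvA_chars text.toList
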